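-- pv_equiv track=rewrite | github.com/weiyangzen/awesome_algorithms | Algorithms/数学-计算拓扑-0253-离散Morse理论/demo.py | group_cells_by_dim
-- ===== SOURCE A (Python) =====
-- from typing import Dict, Iterable, List, Sequence, Set, Tuple
--
-- Simplex = Tuple[int, ...]
--
-- def simplex_dim(s: Simplex) -> int:
--     return len(s) - 1
--
-- def group_cells_by_dim(cells: Iterable[Simplex]) -> Dict[int, List[Simplex]]:
--     grouped: Dict[int, List[Simplex]] = {}
--     for c in cells:
--         d = simplex_dim(c)
--         grouped.setdefault(d, []).append(c)
--     for d in grouped: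
--         grouped[d].sort()
--     return grouped
-- ===== SOURCE B (Python) =====
-- def group_cells_by_dim(cells):
--     cells = list(cells)
--     order = dict.fromkeys(len(c) - 1 for c in cells)
--     srt = sorted(cells)
--     return {d: [c for c in srt if len(c) - 1 == d] for d in order}
-- ===== Notes on version B (the rewrite author's own statement) =====
-- stated objective: alternative
-- what changed: Instead of bucketing cells into a dict and sorting each bucket, B sorts the whole input once and builds each dimension's (first-occurrence-ordered) group by filtering the globally sorted list, relying on the fact that a global tuple sort restricted to one dimension is that bucket's sort.
import Mathlib
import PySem

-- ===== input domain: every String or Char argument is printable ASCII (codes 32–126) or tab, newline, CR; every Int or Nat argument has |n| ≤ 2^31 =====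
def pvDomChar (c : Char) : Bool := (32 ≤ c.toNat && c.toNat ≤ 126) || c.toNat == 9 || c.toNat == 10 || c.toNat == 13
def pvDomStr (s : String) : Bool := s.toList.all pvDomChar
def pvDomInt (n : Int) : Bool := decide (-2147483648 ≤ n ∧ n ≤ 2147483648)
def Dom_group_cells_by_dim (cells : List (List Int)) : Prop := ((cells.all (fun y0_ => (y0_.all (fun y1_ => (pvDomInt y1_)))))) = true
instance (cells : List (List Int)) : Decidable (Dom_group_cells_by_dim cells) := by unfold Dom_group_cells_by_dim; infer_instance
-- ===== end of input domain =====

-- B replaces A's "bucket into a dict, then sort every bucket" by "sort the whole input once,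
-- then build each first-seen dimension's group by restricting the sorted list" (objective: alternative).

-- ===== PORT A =====
def simplex_dim (s : List Int) : Int := (s.length : Int) - 1

def group_cells_by_dim (cells : List (List Int)) : List (Int × List (List Int)) :=
  -- grouped.setdefault(d, []).append(c)  ==  grouped[d] = grouped.get(d, []) + [c]  (new key appended at the end)
  let grouped : PySem.Dict Int (List (List Int)) :=
    cells.foldl (fun g c => g.modify (simplex_dim c) [] (fun l => l ++ [c])) PySem.Dict.empty
  -- for d in grouped: grouped[d].sort()
  let grouped2 : PySem.Dict Int (List (List Int)) :=
    grouped.keys.foldl (fun g d => g.modify d [] (fun l => PySem.List.sorted l (fun x => x) false)) grouped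
  grouped2.items

-- ===== PORT B =====
def group_cells_by_dim_alt (cells : List (List Int)) : List (Int × List (List Int)) :=
  let order : List Int := PySem.List.dedup (cells.map (fun c => (c.length : Int) - 1))
  let srt : List (List Int) := PySem.List.sorted cells (fun x => x) false
  order.map (fun d => (d, srt.filter (fun c => (c.length : Int) - 1 == d)))

-- ===== PRECONDITION & SPEC =====
def Spec_group_cells_by_dim (cells : List (List Int)) (out : List (Int × List (List Int))) : Prop := out = group_cells_by_dim_alt cells
instance (cells : List (List Int)) (out : List (Int × List (List Int))) : Decidable (Spec_group_cells_by_dim cells out) := by unfold Spec_group_cells_by_dim; infer_instance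

-- ===== CLAIM (what is proved, stated in full; the proofs are below) =====
def Claim_equal_group_cells_by_dim : Prop := ∀ (cells : List (List Int)), Dom_group_cells_by_dim cells → Spec_group_cells_by_dim cells (group_cells_by_dim cells)

-- ===== LEMMAS AND PROOFS =====

-- sorting then filtering is filtering then sorting (a global Python tuple-sort restricted
-- to one dimension class is that class's sort)
theorem pv_sorted_filter (xs : List (List Int)) (p : List Int → Bool) :
    PySem.List.sorted (xs.filter p) (fun x => x) false
      = (PySem.List.sorted xs (fun x => x) false).filter p := by
  have h : (fun a b : List Int => a.decidableLT b)
      = (@LinearOrder.toDecidableLT (List Int) List.instLinearOrder) := by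
    funext a b; exact Subsingleton.elim _ _
  show @PySem.List.sorted (List Int) (List Int) List.instLT (fun a b => a.decidableLT b) (List.filter p xs) (fun x => x) false
      = List.filter p (@PySem.List.sorted (List Int) (List Int) List.instLT (fun a b => a.decidableLT b) xs (fun x => x) false)
  rw [h]
  exact PySem.List.sorted_id_eq_of_perm_of_pairwise _ _
    ((@PySem.List.sorted_perm (List Int) (List Int) List.instLT LinearOrder.toDecidableLT xs (fun x => x) false).filter p)
    ((@PySem.List.sorted_pairwise (List Int) (List Int) List.instLinearOrder xs (fun x => x)).filter p)

-- s.update(s) adds nothing new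
theorem pv_update_self (s : List Int) : PySem.Set.update s s = s := by
  rw [PySem.Set.update_eq_append_filter]
  have h : (PySem.Set.ofList s).filter (fun y => !(PySem.Set.contains s y)) = [] := by
    apply List.filter_eq_nil_iff.mpr
    intro a ha
    have hm : a ∈ s := (PySem.Set.mem_ofList _ _).mp ha
    simpa using hm
  rw [h]
  simp

-- value of the phase-1 grouping dict at any key
theorem pv_phase1_getD (cells : List (List Int)) (k : Int) :
    (cells.foldl (fun g c => g.modify (simplex_dim c) [] (fun l => l ++ [c]))
        (PySem.Dict.empty : PySem.Dict Int (List (List Int)))).getD k []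
      = cells.filter (fun c => simplex_dim c == k) := by
  have h : cells.foldl (fun g c => g.modify (simplex_dim c) [] (fun l => l ++ [c]))
        (PySem.Dict.empty : PySem.Dict Int (List (List Int)))
      = (cells.map (fun c => (simplex_dim c, c))).foldl
          (fun g p => g.modify p.1 [] (fun l => l ++ [p.2])) PySem.Dict.empty := by
    rw [List.foldl_map]
  rw [h, PySem.Dict.getD_foldl_modify_append, PySem.Dict.getD_empty]
  simp [List.filter_map, Function.comp_def]

-- a fold of modifies at keys avoiding k leaves the value at k unchanged
theorem pv_foldl_modify_getD_not_mem (f : List (List Int) → List (List Int)) :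
    ∀ (ks : List Int) (g : PySem.Dict Int (List (List Int))) (k : Int), k ∉ ks →
      (ks.foldl (fun g d => g.modify d [] f) g).getD k [] = g.getD k [] := by
  intro ks
  induction ks with
  | nil => intro g k _; rfl
  | cons d t ih =>
      intro g k hk
      simp only [List.foldl_cons]
      rw [ih _ k (fun h => hk (List.mem_cons_of_mem _ h))]
      exact PySem.Dict.getD_modify_of_ne g [] f (show k ≠ d from fun h => hk (by rw [h]; exact List.mem_cons_self))

-- a fold of modifies over distinct keys applies f exactly once at each of them
theorem pv_foldl_modify_getD_mem (f : List (List Int) → List (List Int)) :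
    ∀ (ks : List Int) (g : PySem.Dict Int (List (List Int))) (k : Int), ks.Nodup → k ∈ ks →
      (ks.foldl (fun g d => g.modify d [] f) g).getD k [] = f (g.getD k []) := by
  intro ks
  induction ks with
  | nil => intro g k _ hk; cases hk
  | cons d t ih =>
      intro g k hnd hk
      simp only [List.foldl_cons]
      rcases List.mem_cons.mp hk with rfl | hkt
      · rw [pv_foldl_modify_getD_not_mem f t _ k (List.nodup_cons.mp hnd).1,
          PySem.Dict.getD_modify_self]
      · rw [ih _ k (List.nodup_cons.mp hnd).2 hkt]
        rw [PySem.Dict.getD_modify_of_ne g [] f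
          (show k ≠ d from fun h => (List.nodup_cons.mp hnd).1 (by rw [h] at hkt; exact hkt))]

-- ===== VERDICT (by name: the statement is the Claim_ definition above) =====
theorem group_cells_by_dim_spec : Claim_equal_group_cells_by_dim := by
  intro cells _
  unfold Spec_group_cells_by_dim group_cells_by_dim group_cells_by_dim_alt
  -- the phase-1 dict
  set g1 := cells.foldl (fun g c => g.modify (simplex_dim c) [] (fun l => l ++ [c]))
      (PySem.Dict.empty : PySem.Dict Int (List (List Int))) with hg1
  have hkeys1 : g1.keys = PySem.Set.ofList (cells.map simplex_dim) := by
    rw [hg1, PySem.Dict.keys_foldl_modify_key cells simplex_dim [] (fun _ c l => l ++ [c]),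
      PySem.Dict.keys_empty, PySem.Set.update_nil_left]
  have hnd1 : g1.keys.Nodup := by
    rw [hg1]
    exact PySem.Dict.nodup_keys_foldl_modify_key cells simplex_dim [] _ _ PySem.Dict.nodup_keys_empty
  -- the phase-2 dict
  set f0 : List (List Int) → List (List Int) := fun l => PySem.List.sorted l (fun x => x) false with hf0
  set g2 := g1.keys.foldl (fun g d => g.modify d [] f0) g1 with hg2
  have hkeys2 : g2.keys = g1.keys := by
    rw [hg2, PySem.Dict.keys_foldl_modify_key g1.keys (fun d => d) [] (fun _ _ => f0) g1]
    simp [pv_update_self]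
  have hnd2 : g2.keys.Nodup := hkeys2 ▸ hnd1
  rw [PySem.Dict.items_eq_map_keys g2 hnd2 [], hkeys2, hkeys1, ← PySem.List.dedup_eq_ofList]
  apply List.map_congr_left
  intro k hk
  have hkmem : k ∈ g1.keys := by
    rw [hkeys1, ← PySem.List.dedup_eq_ofList]; exact hk
  have hget2 : g2.getD k [] = f0 (g1.getD k []) :=
    pv_foldl_modify_getD_mem f0 g1.keys g1 k hnd1 hkmem
  rw [hget2, hg1, pv_phase1_getD]
  have hb : f0 (cells.filter (fun c => simplex_dim c == k))
      = PySem.List.sorted (cells.filter (fun c => simplex_dim c == k)) (fun x => x) false := rfl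
  rw [hb, pv_sorted_filter]
  simp [simplex_dim]
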